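-- pv_equiv track=rewrite | github.com/solma/com.sma | src/main/python/alg/remove_duplicate_letters.py | removeDuplicateLettersStack
-- ===== SOURCE A (Python) =====
-- import collections
--
-- def removeDuplicateLettersStack(s):
--   counter = collections.Counter(s)
--   resultSet = set()
--   stack = []
--   for c in s:
--     counter[c] -= 1
--     if c in resultSet:
--       continue
--     while stack and stack[-1] > c and counter[stack[-1]]:
--       resultSet.remove(stack.pop())
--     resultSet.add(c)
--     stack.append(c)
--   return ''.join(stack)
-- ===== SOURCE B (Python) =====
-- def removeDuplicateLettersStack(s):
--   # Repeated selection: the first emitted character must come from the prefix that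
--   # ends at the earliest last-occurrence; pick the smallest such character, emit it,
--   # and recurse on the suffix after its first occurrence with that character erased.
--   if not s:
--     return ''
--   k = min(s.rindex(ch) for ch in set(s))
--   c = min(s[:k + 1])
--   return c + removeDuplicateLettersStack(s[s.index(c) + 1:].replace(c, ''))
-- ===== Notes on version B (the rewrite author's own statement) =====
-- stated objective: simpler
-- what changed: Replaces the greedy stack-with-counter scan by a repeated-selection recursion: emit the smallest character of the prefix ending at the earliest last-occurrence, then recurse on the suffix after its first occurrence with that character erased.
import Mathlib
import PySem

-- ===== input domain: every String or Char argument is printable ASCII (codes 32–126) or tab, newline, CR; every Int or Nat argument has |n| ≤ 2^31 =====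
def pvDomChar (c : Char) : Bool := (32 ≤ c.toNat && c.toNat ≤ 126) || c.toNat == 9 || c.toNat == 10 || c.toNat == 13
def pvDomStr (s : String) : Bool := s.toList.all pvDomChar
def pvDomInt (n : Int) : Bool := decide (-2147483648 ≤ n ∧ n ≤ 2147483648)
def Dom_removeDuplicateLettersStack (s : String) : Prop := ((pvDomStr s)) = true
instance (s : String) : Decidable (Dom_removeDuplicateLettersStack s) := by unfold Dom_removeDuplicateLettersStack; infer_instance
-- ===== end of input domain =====

-- B replaces A's greedy stack scan by a repeated-selection recursion (emit the smallest
-- character of the prefix ending at the earliest last-occurrence, recurse on the cleaned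
-- suffix); objective: a simpler, structurally different implementation (not faster).

-- ===== PORT A =====
-- The Python stack (append/pop at the RIGHT end) is kept top-at-head here (push = cons,
-- stack[-1] = head, pop = tail); ''.join(stack) bottom-first is therefore String.mk of the reverse.
-- the 'while stack and stack[-1] > c and counter[stack[-1]]: resultSet.remove(stack.pop())' loop
def rdlsPop (counter : PySem.Dict Char Int) (resultSet : PySem.Set Char) (stack : List Char) (c : Char) : PySem.Set Char × List Char :=
  match stack with
  | [] => (resultSet, [])
  | top :: rest =>
    if top > c ∧ counter.getD top 0 ≠ 0 then
      -- resultSet.remove(top): top is always a member (KeyError unreachable), so remove? = some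
      rdlsPop counter ((PySem.Set.remove? resultSet top).getD resultSet) rest c
    else (resultSet, top :: rest)

-- one iteration of 'for c in s'
def rdlsStep (acc : PySem.Dict Char Int × PySem.Set Char × List Char) (c : Char) : PySem.Dict Char Int × PySem.Set Char × List Char :=
  let counter := acc.1.modify c 0 (· - 1)          -- counter[c] -= 1
  if PySem.Set.contains acc.2.1 c then
    (counter, acc.2.1, acc.2.2)                    -- if c in resultSet: continue
  else
    let ps := rdlsPop counter acc.2.1 acc.2.2 c    -- the while loop
    (counter, PySem.Set.add ps.1 c, c :: ps.2)     -- resultSet.add(c); stack.append(c)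

def removeDuplicateLettersStack (s : String) : String :=
  -- return ''.join(stack)
  String.mk ((s.toList.foldl rdlsStep (PySem.Dict.counter s.toList, PySem.Set.empty, [])).2.2.reverse)

-- ===== PORT B =====
-- s.rindex(ch) = len(s) - 1 - (index of ch in the reversed string); exact for ch ∈ s, and every
-- ch queried comes from set(s) (rindex's ValueError branch is unreachable).
def rdlaRindex (l : List Char) (ch : Char) : Nat :=
  l.length - 1 - ((PySem.List.index? l.reverse ch).getD 0)

def rdlaGo (l : List Char) : List Char :=
  if _hl : l = [] then [] else                     -- if not s: return ''
    -- k = min(s.rindex(ch) for ch in set(s)) : min over distinct values, order-independent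
    match PySem.List.min? ((PySem.Set.ofList l).map (fun ch => rdlaRindex l ch)) (fun x => x) with
    | none => []                                   -- unreachable: set(s) nonempty
    | some k =>
      match PySem.List.min? (l.take (k + 1)) (fun x => x) with   -- c = min(s[:k+1])
      | none => []                                 -- unreachable: the prefix is nonempty
      | some c =>
        let m := (PySem.List.index? l c).getD 0    -- s.index(c): c ∈ s, cannot raise
        -- s[m+1:] is drop (m+1); .replace(c, '') erases every occurrence of c, i.e. filter
        c :: rdlaGo ((l.drop (m + 1)).filter (· != c))
termination_by l.length
decreasing_by
  refine lt_of_le_of_lt (List.length_filter_le _ _) ?_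
  rw [List.length_drop]
  have h3 : 0 < l.length := List.length_pos_iff.mpr _hl
  omega

def removeDuplicateLettersStack_alt (s : String) : String :=
  String.mk (rdlaGo s.toList)

-- ===== PRECONDITION & SPEC =====
def Spec_removeDuplicateLettersStack (s : String) (out : String) : Prop := out = removeDuplicateLettersStack_alt s
instance (s : String) (out : String) : Decidable (Spec_removeDuplicateLettersStack s out) := by unfold Spec_removeDuplicateLettersStack; infer_instance

-- ===== CLAIM (what is proved, stated in full; the proofs are below) =====
def Claim_equal_removeDuplicateLettersStack : Prop := ∀ (s : String), Dom_removeDuplicateLettersStack s → Spec_removeDuplicateLettersStack s (removeDuplicateLettersStack s)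

-- ===== LEMMAS AND PROOFS =====

-- Abstract form of A's loop: the counter is just "count in the remaining suffix" and the
-- result set is just "membership in the stack".
def popAbs (c : Char) (rs : List Char) : List Char → List Char
  | [] => []
  | t :: st => if c < t ∧ t ∈ rs then popAbs c rs st else t :: st

def goAbs : List Char → List Char → List Char
  | st, [] => st
  | st, ch :: rs => if ch ∈ st then goAbs st rs else goAbs (ch :: popAbs ch rs st) rs

theorem popAbs_suffix (c : Char) (rs : List Char) : ∀ st : List Char, popAbs c rs st <:+ st := by
  intro st
  induction st with
  | nil => exact List.suffix_rfl
  | cons t st ih =>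
    by_cases h : c < t ∧ t ∈ rs
    · simpa [popAbs, h] using ih.trans (List.suffix_cons t st)
    · simp [popAbs, h]

theorem popAbs_subset {c : Char} {rs st : List Char} {d : Char} (h : d ∈ popAbs c rs st) : d ∈ st :=
  (popAbs_suffix c rs st).subset h

theorem mem_popAbs_of_not_mem {c : Char} {rs : List Char} {d : Char} :
    ∀ {st : List Char}, d ∈ st → d ∉ rs → d ∈ popAbs c rs st := by
  intro st
  induction st with
  | nil => intro h _; exact absurd h (List.not_mem_nil)
  | cons t st ih =>
    intro hd hrs
    by_cases h : c < t ∧ t ∈ rs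
    · rcases List.mem_cons.mp hd with rfl | hd'
      · exact absurd h.2 hrs
      · simpa [popAbs, h] using ih hd' hrs
    · simpa [popAbs, h] using hd

theorem popAbs_all {c : Char} {rs : List Char} :
    ∀ {st : List Char}, (∀ d ∈ st, c < d ∧ d ∈ rs) → popAbs c rs st = [] := by
  intro st
  induction st with
  | nil => intro _; rfl
  | cons t st ih =>
    intro h
    have ht := h t (List.mem_cons_self)
    simpa [popAbs, ht] using ih (fun d hd => h d (List.mem_cons_of_mem _ hd))

-- A's pop loop agrees with popAbs when the counter counts the remaining suffix and the
-- set is stack membership.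
theorem rdlsPop_spec (K : PySem.Dict Char Int) (c : Char) (rs : List Char)
    (hK : ∀ d, K.getD d 0 = (rs.count d : Int)) :
    ∀ (st : List Char) (R : PySem.Set Char), st.Nodup → (∀ d, d ∈ R ↔ d ∈ st) →
      (rdlsPop K R st c).2 = popAbs c rs st ∧
      (∀ d, d ∈ (rdlsPop K R st c).1 ↔ d ∈ popAbs c rs st) := by
  intro st
  induction st with
  | nil =>
    intro R _ hR
    refine ⟨rfl, fun d => ?_⟩
    simp [rdlsPop, popAbs, hR d]
  | cons t st ih =>
    intro R hnd hR
    have hcount : (K.getD t 0 ≠ 0) ↔ t ∈ rs := by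
      rw [hK t, ← List.count_pos_iff]
      omega
    by_cases h : c < t ∧ t ∈ rs
    · have hKt : K.getD t 0 ≠ 0 := hcount.mpr h.2
      have hmemR : t ∈ R := (hR t).mpr List.mem_cons_self
      have hrm : (PySem.Set.remove? R t).getD R = PySem.Set.discard R t := by
        rw [PySem.Set.remove?_of_mem hmemR]; rfl
      have hR' : ∀ d, d ∈ PySem.Set.discard R t ↔ d ∈ st := by
        intro d
        rw [PySem.Set.mem_discard, hR d]
        constructor
        · rintro ⟨hd, hne⟩
          rcases List.mem_cons.mp hd with rfl | hd'
          · exact absurd rfl hne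
          · exact hd'
        · intro hd
          refine ⟨List.mem_cons_of_mem _ hd, ?_⟩
          rintro rfl
          exact (List.nodup_cons.mp hnd).1 hd
      have := ih (PySem.Set.discard R t) (List.nodup_cons.mp hnd).2 hR'
      constructor
      · rw [show rdlsPop K R (t :: st) c = rdlsPop K ((PySem.Set.remove? R t).getD R) st c by
              simp [rdlsPop, h.1, hKt], hrm]
        rw [this.1]
        simp [popAbs, h]
      · rw [show rdlsPop K R (t :: st) c = rdlsPop K ((PySem.Set.remove? R t).getD R) st c by
              simp [rdlsPop, h.1, hKt], hrm]
        intro d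
        rw [this.2 d]
        simp [popAbs, h]
    · have hstop : ¬ (t > c ∧ K.getD t 0 ≠ 0) := by
        intro ⟨h1, h2⟩
        exact h ⟨h1, hcount.mp h2⟩
      constructor
      · simp [rdlsPop, hstop, popAbs, h]
      · intro d
        simp [rdlsPop, hstop, popAbs, h, hR d]

-- A's whole loop agrees with goAbs.
theorem foldl_rdlsStep_abs :
    ∀ (rest : List Char) (K : PySem.Dict Char Int) (R : PySem.Set Char) (st : List Char),
      st.Nodup → (∀ d, d ∈ R ↔ d ∈ st) → (∀ d, K.getD d 0 = (rest.count d : Int)) →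
      (rest.foldl rdlsStep (K, R, st)).2.2 = goAbs st rest := by
  intro rest
  induction rest with
  | nil => intro K R st _ _ _; rfl
  | cons ch rest ih =>
    intro K R st hnd hR hK
    have hK' : ∀ d, (K.modify ch 0 (· - 1)).getD d 0 = (rest.count d : Int) := by
      intro d
      rw [PySem.Dict.getD_modify]
      by_cases hd : d = ch
      · subst hd
        rw [if_pos rfl, hK d, List.count_cons]
        simp
      · rw [if_neg hd, hK d, List.count_cons]
        simp [Ne.symm hd]
    by_cases hmem : ch ∈ st
    · have hc : PySem.Set.contains R ch = true := by
        simp [PySem.Set.contains, hR ch, hmem]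
      rw [List.foldl_cons, show rdlsStep (K, R, st) ch = (K.modify ch 0 (· - 1), R, st) by
            simp [rdlsStep, (hR ch).mpr hmem]]
      rw [ih _ _ _ hnd hR hK']
      simp [goAbs, hmem]
    · have hc : ¬ PySem.Set.contains R ch = true := by
        simp [PySem.Set.contains, hR ch, hmem]
      obtain ⟨hpop2, hpop1⟩ := rdlsPop_spec (K.modify ch 0 (· - 1)) ch rest hK' st R hnd hR
      have hnR : ch ∉ R := fun h => hmem ((hR ch).mp h)
      rw [List.foldl_cons, show rdlsStep (K, R, st) ch
            = (K.modify ch 0 (· - 1),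
               PySem.Set.add (rdlsPop (K.modify ch 0 (· - 1)) R st ch).1 ch,
               ch :: (rdlsPop (K.modify ch 0 (· - 1)) R st ch).2) by
            simp [rdlsStep, hnR]]
      rw [hpop2]
      have hnd' : (ch :: popAbs ch rest st).Nodup := by
        refine List.nodup_cons.mpr ⟨fun h => hmem (popAbs_subset h), ?_⟩
        exact ((popAbs_suffix ch rest st).sublist).nodup hnd
      have hR' : ∀ d, d ∈ PySem.Set.add (rdlsPop (K.modify ch 0 (· - 1)) R st ch).1 ch ↔ d ∈ ch :: popAbs ch rest st := by
        intro d
        rw [PySem.Set.mem_add, hpop1 d, List.mem_cons]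
        tauto
      rw [ih _ _ _ hnd' hR' hK']
      simp [goAbs, hmem]

-- ---- B-side structure: the selected index k is the earliest last-occurrence ----

-- rindex decomposes the list around the LAST occurrence.
theorem rdlaRindex_decomp {l : List Char} {ch : Char} (h : ch ∈ l) :
    ∃ pre suf, l = pre ++ ch :: suf ∧ rdlaRindex l ch = pre.length ∧ ch ∉ suf := by
  have hrev : ch ∈ l.reverse := List.mem_reverse.mpr h
  obtain ⟨j, hj⟩ := Option.isSome_iff_exists.mp ((PySem.List.index?_isSome_iff l.reverse ch).mpr hrev)
  obtain ⟨p, sfx, hps, hlen, hnp⟩ := (PySem.List.index?_eq_some_iff l.reverse ch j).mp hj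
  refine ⟨sfx.reverse, p.reverse, ?_, ?_, ?_⟩
  · have := congrArg List.reverse hps
    simpa using this
  · have hlength := congrArg List.length hps
    simp at hlength
    rw [rdlaRindex, hj]
    simp only [Option.getD_some, List.length_reverse]
    omega
  · simpa using hnp

-- (b): before any last occurrence, every character re-occurs later.
theorem reoccur_before_k {l : List Char} {k : Nat}
    (hmin : ∀ ch ∈ l, k ≤ rdlaRindex l ch) :
    ∀ j, j < k → ∀ hjl : j < l.length, l[j] ∈ l.drop (j + 1) := by
  intro j hjk hjl
  have hmem : l[j] ∈ l := List.getElem_mem hjl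
  obtain ⟨pre, suf, hdec, hlen, _⟩ := rdlaRindex_decomp hmem
  have hge : k ≤ pre.length := hlen ▸ hmin _ hmem
  have hplt : pre.length < l.length := by
    have hll := congrArg List.length hdec
    simp at hll
    omega
  have hget : l[pre.length]'hplt = l[j] := by
    rw [List.getElem_of_eq hdec hplt]
    simp [List.getElem_append_right (Nat.le_refl pre.length)]
  have : (l.drop (j + 1))[pre.length - (j + 1)]'(by simp; omega) = l[j] := by
    rw [List.getElem_drop]
    simp only [show j + 1 + (pre.length - (j + 1)) = pre.length from by omega]
    exact hget
  exact this ▸ List.getElem_mem _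

-- chain the re-occurrences: anything present from position j ≤ k is still present from k.
theorem occ_chain {l : List Char} {k : Nat}
    (hb : ∀ j, j < k → ∀ hjl : j < l.length, l[j] ∈ l.drop (j + 1)) (hk : k < l.length) :
    ∀ (n j : Nat), j + n = k → ∀ d, d ∈ l.drop j → d ∈ l.drop k := by
  intro n
  induction n with
  | zero => intro j hj d hd; rwa [show j = k by omega] at hd
  | succ n ih =>
    intro j hj d hd
    have hjl : j < l.length := by omega
    rw [List.drop_eq_getElem_cons hjl] at hd
    rcases List.mem_cons.mp hd with rfl | hd'
    · exact ih (j + 1) (by omega) _ (hb j (by omega) hjl)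
    · exact ih (j + 1) (by omega) _ hd'

-- Phase A: processing the prefix before c's first occurrence leaves exactly [c] on the stack.
theorem phaseA (c : Char) (t : List Char) :
    ∀ (pre st : List Char), (∀ d ∈ st, c < d ∧ d ∈ t) → (∀ d ∈ pre, c < d ∧ d ∈ t) →
      goAbs st (pre ++ c :: t) = goAbs [c] t := by
  intro pre
  induction pre with
  | nil =>
    intro st hst _
    have hcst : c ∉ st := fun h => lt_irrefl c (hst c h).1
    simp only [List.nil_append, goAbs, if_neg hcst]
    rw [popAbs_all hst]
  | cons a pre ih =>
    intro st hst hpre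
    have ha := hpre a List.mem_cons_self
    have hpre' : ∀ d ∈ pre, c < d ∧ d ∈ t := fun d hd => hpre d (List.mem_cons_of_mem _ hd)
    by_cases hmem : a ∈ st
    · simpa [goAbs, hmem] using ih st hst hpre'
    · have hst' : ∀ d ∈ a :: popAbs a (pre ++ c :: t) st, c < d ∧ d ∈ t := by
        intro d hd
        rcases List.mem_cons.mp hd with rfl | hd'
        · exact ha
        · exact hst d (popAbs_subset hd')
      simpa [goAbs, hmem] using ih _ hst' hpre'

-- the pop loop with the sentinel c at the bottom, vs. without it on the filtered suffix
theorem popc {c ch : Char} {r' : List Char} :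
    ∀ {st : List Char}, c ∉ st → (¬ (ch < c ∧ c ∈ r') ∨ ∃ d ∈ st, d ∉ r') →
      popAbs ch r' (st ++ [c]) = popAbs ch (r'.filter (· != c)) st ++ [c] := by
  intro st
  induction st with
  | nil =>
    intro _ hguard
    rcases hguard with hg | ⟨d, hd, _⟩
    · simp only [List.nil_append, popAbs, if_neg hg]
    · exact absurd hd (List.not_mem_nil)
  | cons d st ih =>
    intro hcst hguard
    have hdc : d ≠ c := fun h => hcst (h ▸ List.mem_cons_self)
    have hcond : (ch < d ∧ d ∈ r'.filter (· != c)) ↔ (ch < d ∧ d ∈ r') := by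
      simp [List.mem_filter, hdc]
    by_cases h : ch < d ∧ d ∈ r'
    · have hguard' : ¬ (ch < c ∧ c ∈ r') ∨ ∃ e ∈ st, e ∉ r' := by
        rcases hguard with hg | ⟨e, he, her⟩
        · exact Or.inl hg
        · rcases List.mem_cons.mp he with rfl | he'
          · exact absurd h.2 her
          · exact Or.inr ⟨e, he', her⟩
      have hcst' : c ∉ st := fun hc => hcst (List.mem_cons_of_mem _ hc)
      simpa [popAbs, h, hcond.mpr h] using ih hcst' hguard'
    · have hB : popAbs ch (r'.filter (· != c)) (d :: st) = d :: st := by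
        simp only [popAbs]
        rw [if_neg (fun hh => h (hcond.mp hh))]
      rw [hB]
      show popAbs ch r' (d :: (st ++ [c])) = d :: (st ++ [c])
      simp only [popAbs]
      rw [if_neg h]

-- Phase B: with c pinned at the bottom of the stack, the run on the rest of the string is the
-- fresh run on the rest with all copies of c erased.  SAFE: either we are still inside the
-- prefix ending at the earliest last-occurrence k (all incoming chars are ≥ c), or some stack
-- entry never re-occurs (it blocks the pops), or c itself never re-occurs.
theorem phaseB {l : List Char} {k : Nat} {c : Char} (hk : k < l.length)
    (hcmin : ∀ p, p ≤ k → ∀ hpl : p < l.length, c ≤ l[p])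
    (hz : l[k] ∉ l.drop (k + 1)) :
    ∀ (r st : List Char) (p : Nat), l.drop p = r → c ∉ st →
      (p ≤ k ∨ (∃ d ∈ st, d ∉ r) ∨ c ∉ r) →
      goAbs (st ++ [c]) r = goAbs st (r.filter (· != c)) ++ [c] := by
  intro r
  induction r with
  | nil => intro st p _ _ _; simp [goAbs]
  | cons ch r' ihr =>
    intro st p hpr hcst hsafe
    have hpl : p < l.length := by
      by_contra h
      rw [List.drop_eq_nil_of_le (by omega)] at hpr
      exact List.cons_ne_nil ch r' hpr.symm
    have hch : l[p] = ch ∧ l.drop (p + 1) = r' := by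
      rw [List.drop_eq_getElem_cons hpl] at hpr
      exact ⟨(List.cons.injEq _ _ _ _ ▸ hpr).1, (List.cons.injEq _ _ _ _ ▸ hpr).2⟩
    by_cases hc : ch = c
    · -- a later copy of c: skipped on the A side, erased by the filter on the B side
      subst hc
      have hmem : ch ∈ st ++ [ch] := by simp
      have hsafe' : p + 1 ≤ k ∨ (∃ d ∈ st, d ∉ r') ∨ ch ∉ r' := by
        rcases hsafe with h1 | ⟨d, hd, hdr⟩ | h3
        · rcases Nat.lt_or_ge p k with hlt | hge
          · exact Or.inl (by omega)
          · have : p = k := by omega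
            subst this
            exact Or.inr (Or.inr (hch.1 ▸ hch.2 ▸ hz))
        · exact Or.inr (Or.inl ⟨d, hd, fun h => hdr (List.mem_cons_of_mem _ h)⟩)
        · exact absurd List.mem_cons_self h3
      simpa [goAbs, hmem] using ihr st (p + 1) hch.2 hcst hsafe'
    · by_cases hmem : ch ∈ st
      · -- already on the stack: both sides skip
        have hmem' : ch ∈ st ++ [c] := List.mem_append_left _ hmem
        have hsafe' : p + 1 ≤ k ∨ (∃ d ∈ st, d ∉ r') ∨ c ∉ r' := by
          rcases hsafe with h1 | ⟨d, hd, hdr⟩ | h3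
          · rcases Nat.lt_or_ge p k with hlt | hge
            · exact Or.inl (by omega)
            · have : p = k := by omega
              subst this
              exact Or.inr (Or.inl ⟨ch, hmem, hch.1 ▸ hch.2 ▸ hz⟩)
          · exact Or.inr (Or.inl ⟨d, hd, fun h => hdr (List.mem_cons_of_mem _ h)⟩)
          · exact Or.inr (Or.inr (fun h => h3 (List.mem_cons_of_mem _ h)))
        simpa [goAbs, hmem', hmem, hc] using ihr st (p + 1) hch.2 hcst hsafe'
      · -- a new character: pops happen; c at the bottom is never reached/popped
        have hmem' : ch ∉ st ++ [c] := by
          simp [hmem, hc]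
        have hguard : ¬ (ch < c ∧ c ∈ r') ∨ ∃ d ∈ st, d ∉ r' := by
          rcases hsafe with h1 | ⟨d, hd, hdr⟩ | h3
          · have : c ≤ ch := hch.1 ▸ hcmin p h1 hpl
            exact Or.inl (fun hh => absurd hh.1 (not_lt.mpr this))
          · exact Or.inr ⟨d, hd, fun h => hdr (List.mem_cons_of_mem _ h)⟩
          · exact Or.inl (fun hh => h3 (List.mem_cons_of_mem _ hh.2))
        have hpopc := popc (r' := r') (ch := ch) hcst hguard
        have hcst' : c ∉ ch :: popAbs ch (r'.filter (· != c)) st := by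
          intro h
          rcases List.mem_cons.mp h with h1 | h2
          · exact hc h1.symm
          · exact hcst (popAbs_subset h2)
        have hsafe' : p + 1 ≤ k ∨ (∃ d ∈ ch :: popAbs ch (r'.filter (· != c)) st, d ∉ r') ∨ c ∉ r' := by
          rcases hsafe with h1 | ⟨d, hd, hdr⟩ | h3
          · rcases Nat.lt_or_ge p k with hlt | hge
            · exact Or.inl (by omega)
            · have : p = k := by omega
              subst this
              exact Or.inr (Or.inl ⟨ch, List.mem_cons_self, hch.1 ▸ hch.2 ▸ hz⟩)
          · have hdr' : d ∉ r' := fun h => hdr (List.mem_cons_of_mem _ h)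
            have : d ∈ popAbs ch (r'.filter (· != c)) st :=
              mem_popAbs_of_not_mem hd (fun h => hdr' (List.mem_filter.mp h).1)
            exact Or.inr (Or.inl ⟨d, List.mem_cons_of_mem _ this, hdr'⟩)
          · exact Or.inr (Or.inr (fun h => h3 (List.mem_cons_of_mem _ h)))
        have hrec := ihr (ch :: popAbs ch (r'.filter (· != c)) st) (p + 1) hch.2 hcst' hsafe'
        have hfc : (ch :: r').filter (· != c) = ch :: r'.filter (· != c) := by
          simp [hc]
        calc goAbs (st ++ [c]) (ch :: r')
            = goAbs (ch :: popAbs ch r' (st ++ [c])) r' := by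
              simp only [goAbs, if_neg hmem']
          _ = goAbs ((ch :: popAbs ch (r'.filter (· != c)) st) ++ [c]) r' := by
              rw [hpopc]; rfl
          _ = goAbs (ch :: popAbs ch (r'.filter (· != c)) st) (r'.filter (· != c)) ++ [c] := hrec
          _ = goAbs st ((ch :: r').filter (· != c)) ++ [c] := by
              rw [hfc]
              simp only [goAbs, if_neg hmem]

-- The main induction: the abstract greedy run equals B's repeated-selection recursion.
theorem goAbs_eq_rdlaGo : ∀ (n : Nat) (l : List Char), l.length ≤ n → goAbs [] l = (rdlaGo l).reverse := by
  intro n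
  induction n with
  | zero =>
    intro l hl
    have : l = [] := List.length_eq_zero_iff.mp (by omega)
    subst this
    simp [rdlaGo, goAbs]
  | succ n ih =>
    intro l hl
    by_cases hlnil : l = []
    · subst hlnil; simp [rdlaGo, goAbs]
    · -- unpack B's selections
      obtain ⟨k, hkeq⟩ : ∃ k, PySem.List.min? ((PySem.Set.ofList l).map (fun ch => rdlaRindex l ch)) (fun x => x) = some k := by
        cases hmm : PySem.List.min? ((PySem.Set.ofList l).map (fun ch => rdlaRindex l ch)) (fun x => x) with
        | none =>
          rw [PySem.List.min?_eq_none_iff, List.map_eq_nil_iff] at hmm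
          obtain ⟨a, ha⟩ := List.exists_mem_of_ne_nil l hlnil
          exact absurd ((PySem.Set.mem_ofList l a).mpr ha) (hmm ▸ List.not_mem_nil)
        | some k => exact ⟨k, rfl⟩
      -- k is the last occurrence of some character …
      obtain ⟨ch0, hch0set, hch0⟩ := List.mem_map.mp (PySem.List.min?_mem hkeq)
      have hch0l : ch0 ∈ l := (PySem.Set.mem_ofList l ch0).mp hch0set
      obtain ⟨preK, sufK, hKdec, hKlen, hKno⟩ := rdlaRindex_decomp hch0l
      have hkp : k = preK.length := by rw [← hch0, hKlen]
      subst hkp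
      have hllK := congrArg List.length hKdec
      simp at hllK
      have hk : preK.length < l.length := by omega
      have hlk : l[preK.length]'hk = ch0 := by
        rw [List.getElem_of_eq hKdec hk]
        simp [List.getElem_append_right (Nat.le_refl preK.length)]
      have hdropk : l.drop (preK.length + 1) = sufK := by
        rw [hKdec, show preK ++ ch0 :: sufK = (preK ++ [ch0]) ++ sufK from by simp]
        simpa using List.drop_left (l₁ := preK ++ [ch0]) (l₂ := sufK)
      have hz : l[preK.length]'hk ∉ l.drop (preK.length + 1) := by
        rw [hlk, hdropk]; exact hKno
      -- … and the earliest one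
      have hmin : ∀ ch ∈ l, preK.length ≤ rdlaRindex l ch := by
        intro ch hch
        exact PySem.List.min?_isMin hkeq (rdlaRindex l ch)
          (List.mem_map.mpr ⟨ch, (PySem.Set.mem_ofList l ch).mpr hch, rfl⟩)
      -- c = min of the prefix ending at k
      obtain ⟨c, hceq⟩ : ∃ c, PySem.List.min? (l.take (preK.length + 1)) (fun x => x) = some c := by
        cases hmm : PySem.List.min? (l.take (preK.length + 1)) (fun x => x) with
        | none =>
          rw [PySem.List.min?_eq_none_iff, List.take_eq_nil_iff] at hmm
          rcases hmm with h | h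
          · exact absurd h (by omega)
          · exact absurd h hlnil
        | some c => exact ⟨c, rfl⟩
      have hcmem : c ∈ l.take (preK.length + 1) := PySem.List.min?_mem hceq
      have hcmin : ∀ y ∈ l.take (preK.length + 1), c ≤ y := fun y hy => PySem.List.min?_isMin hceq y hy
      have hcl : c ∈ l := List.take_subset _ _ hcmem
      obtain ⟨m, hmeq⟩ := Option.isSome_iff_exists.mp ((PySem.List.index?_isSome_iff l c).mpr hcl)
      obtain ⟨pre, t, hdec, hplen, hcpre⟩ := (PySem.List.index?_eq_some_iff l c m).mp hmeq
      subst hplen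
      have hlld := congrArg List.length hdec
      simp at hlld
      -- the first occurrence of c lies at or before k
      have hmk : pre.length ≤ preK.length := by
        rcases Nat.lt_or_ge preK.length pre.length with hmm | hmm
        · exfalso
          obtain ⟨jc, hjc, hjcv⟩ := List.mem_take_iff_getElem.mp hcmem
          have hjlt : jc < pre.length := by omega
          have : l[jc]'(by omega) ≠ c := by
            rw [List.getElem_of_eq hdec (by omega), List.getElem_append_left hjlt]
            exact fun h => hcpre (h ▸ List.getElem_mem hjlt)
          exact this hjcv
        · exact hmm
      have hlm : l[pre.length]'(by omega) = c := by
        rw [List.getElem_of_eq hdec (by omega)]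
        simp [List.getElem_append_right (Nat.le_refl pre.length)]
      have ht : l.drop (pre.length + 1) = t := by
        rw [hdec, show pre ++ c :: t = (pre ++ [c]) ++ t from by simp]
        simpa using List.drop_left (l₁ := pre ++ [c]) (l₂ := t)
      have hreoccur := reoccur_before_k hmin
      -- every character of pre is > c and re-occurs in t
      have hF : ∀ d ∈ pre, c < d ∧ d ∈ t := by
        intro d hd
        obtain ⟨j, hj, hjv⟩ := List.mem_iff_getElem.mp hd
        have hjl : l[j]'(by omega) = d := by
          rw [List.getElem_of_eq hdec (by omega), List.getElem_append_left hj]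
          exact hjv
        have hcd : c ≤ d := by
          refine hjl ▸ hcmin _ (List.mem_take_iff_getElem.mpr ⟨j, by omega, rfl⟩)
        have hdc : d ≠ c := fun h => hcpre (h ▸ hd)
        refine ⟨lt_of_le_of_ne hcd (fun h => hdc h.symm), ?_⟩
        have hdl : d ∈ l := by rw [hdec]; exact List.mem_append_left _ hd
        have hdk := occ_chain hreoccur hk preK.length 0 (by omega) d (by simpa using hdl)
        rw [List.drop_eq_getElem_cons hk] at hdk
        rcases List.mem_cons.mp hdk with heq | hdk'
        · -- d sits exactly at position k = preK.length; that position is inside t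
          have hmk' : pre.length < preK.length := by
            rcases Nat.lt_or_ge pre.length preK.length with h | h
            · exact h
            · exfalso
              obtain ⟨hpp, hct⟩ := List.append_inj (hdec.symm.trans hKdec) (by omega)
              injection hct with hc0 ht0
              exact hdc (heq.trans (hlk.trans hc0.symm))
          rw [← ht]
          have hkd : (l.drop (pre.length + 1))[preK.length - (pre.length + 1)]'(by simp; omega)
              = l[preK.length]'hk := by
            rw [List.getElem_drop]
            simp only [show pre.length + 1 + (preK.length - (pre.length + 1)) = preK.length from by omega]
          rw [heq, ← hkd]
          exact List.getElem_mem _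
        · rw [← ht]
          have hsub : l.drop (preK.length + 1) ⊆ l.drop (pre.length + 1) := by
            rw [show preK.length + 1 = (pre.length + 1) + (preK.length - pre.length) from by omega, ← List.drop_drop]
            exact List.drop_subset _ _
          exact hsub hdk'
      -- phase A: the stack collapses to [c]
      have hPA : goAbs [] l = goAbs [c] t := by
        rw [show l = pre ++ c :: t from hdec]
        exact phaseA c t pre [] (fun d hd => absurd hd List.not_mem_nil) hF
      -- phase B: c stays at the bottom; the rest is the fresh run on t with c erased
      have hcminP : ∀ p, p ≤ preK.length → ∀ hpl : p < l.length, c ≤ l[p] := by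
        intro p hp hpl
        exact hcmin _ (List.mem_take_iff_getElem.mpr ⟨p, by omega, rfl⟩)
      have hsafe0 : pre.length + 1 ≤ preK.length ∨ (∃ d ∈ ([] : List Char), d ∉ t) ∨ c ∉ t := by
        rcases Nat.lt_or_ge pre.length preK.length with h | h
        · exact Or.inl (by omega)
        · obtain ⟨hpp, hct⟩ := List.append_inj (hdec.symm.trans hKdec) (by omega)
          injection hct with hc0 ht0
          exact Or.inr (Or.inr (hc0 ▸ ht0 ▸ hKno))
      have hPB := phaseB hk hcminP hz t [] (pre.length + 1) ht List.not_mem_nil hsafe0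
      -- induction on the shorter cleaned suffix
      have hlen' : (t.filter (· != c)).length ≤ n := by
        have h1 := List.length_filter_le (· != c) t
        omega
      have hIH := ih _ hlen'
      -- unfold rdlaGo on l
      have hB : rdlaGo l = c :: rdlaGo ((l.drop (pre.length + 1)).filter (· != c)) := by
        rw [rdlaGo]
        simp only [dif_neg hlnil, hkeq, hceq, hmeq, Option.getD_some]
      rw [hPA, show goAbs [c] t = goAbs ([] ++ [c]) t from rfl, hPB, hIH, hB, ht]
      simp

-- ===== VERDICT (by name: the statement is the Claim_ definition above) =====
theorem removeDuplicateLettersStack_spec : Claim_equal_removeDuplicateLettersStack := by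
  unfold Claim_equal_removeDuplicateLettersStack
  intro s _
  unfold Spec_removeDuplicateLettersStack removeDuplicateLettersStack removeDuplicateLettersStack_alt
  have habs := foldl_rdlsStep_abs s.toList (PySem.Dict.counter s.toList) PySem.Set.empty []
    List.nodup_nil (by intro d; simp [PySem.Set.empty]) (by intro d; exact PySem.Dict.getD_counter s.toList d)
  rw [habs, goAbs_eq_rdlaGo s.toList.length s.toList le_rfl]
  simp
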